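-- pv_equiv track=rewrite | github.com/brian-foran/Food_Tracker | receipt_parser.py | cleanup_text
-- ===== SOURCE A (Python) =====
-- def cleanup_text(text):
--     """Cleans up raw receipt text into a list of lines"""
--     lines = text.split('\n')
--     cleaned_lines = []
--     curr_line = ''
--
--     for line in lines:
--         line = line.strip()
--         if line:
--             if line[0].isalpha():
--                 if curr_line:
--                     cleaned_lines.append(curr_line)
--                 cleaned_lines.append(line)
--                 curr_line = ""
--
--             else:
--                  curr_line += line
--
--     if curr_line:
--         cleaned_lines.append(curr_line)
--
--     return cleaned_lines
-- ===== SOURCE B (Python) =====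
-- def cleanup_text(text):
--     """Cleans up raw receipt text into a list of lines"""
--     lines = [l for l in (raw.strip() for raw in text.split('\n')) if l]
--     out = []
--     i = 0
--     n = len(lines)
--     while i < n:
--         if lines[i][0].isalpha():
--             out.append(lines[i])
--             i += 1
--         else:
--             j = i + 1
--             while j < n and not lines[j][0].isalpha():
--                 j += 1
--             out.append(''.join(lines[i:j]))
--             i = j
--     return out
-- ===== Notes on version B (the rewrite author's own statement) =====
-- stated objective: alternative
-- what changed: A's single stateful loop with a curr_line accumulator flushed on each alpha-starting line is replaced by a filter-first pass that detects each maximal run of non-alpha-starting lines and joins it in one step.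
import Mathlib
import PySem

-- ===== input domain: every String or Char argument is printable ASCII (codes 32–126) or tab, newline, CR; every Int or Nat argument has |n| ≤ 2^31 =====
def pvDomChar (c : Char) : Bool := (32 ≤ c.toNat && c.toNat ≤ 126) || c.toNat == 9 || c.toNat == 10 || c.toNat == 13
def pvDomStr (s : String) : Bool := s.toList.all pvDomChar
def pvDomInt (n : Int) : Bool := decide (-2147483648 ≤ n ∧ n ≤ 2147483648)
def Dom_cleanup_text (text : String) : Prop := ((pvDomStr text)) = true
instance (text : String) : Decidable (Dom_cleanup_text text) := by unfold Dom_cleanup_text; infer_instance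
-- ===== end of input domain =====

-- B replaces A's stateful curr_line accumulator (flush-on-alpha) by a filter-first pass that
-- scans maximal runs of non-alpha-starting lines and joins each run in one step (objective: alternative decomposition).

-- shared helper: 'line[0].isalpha()' on a (nonempty) line; both Pythons use this very test
def pvAlphaFirst (line : String) : Bool :=
  match PySem.Str.pyGet? line 0 with
  | some c => PySem.Chars.isalpha c
  | none => false    -- unreachable: both programs only test nonempty lines

-- ===== PORT A =====
-- the body of A's 'for line in lines' loop, state = (cleaned_lines, curr_line)
def pvStepA (st : List String × String) (rawline : String) : List String × String :=
  let line := PySem.Str.strip rawline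
  if line ≠ "" then
    if pvAlphaFirst line then
      (st.1 ++ (if st.2 ≠ "" then [st.2] else []) ++ [line], "")
    else
      (st.1, st.2 ++ line)
  else st

-- A's final 'if curr_line: cleaned_lines.append(curr_line)'
def pvFinishA (st : List String × String) : List String :=
  if st.2 ≠ "" then st.1 ++ [st.2] else st.1

def cleanup_text (text : String) : List String :=
  pvFinishA (List.foldl pvStepA ([], "") ((PySem.Str.split? text "\n").getD []))
  -- sep "\n" ≠ "": split? is always `some` here, getD never takes the default

-- ===== PORT B =====
-- the outer while-loop of Source B; the inner 'while j' run-scan is the takeWhile/dropWhile pair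
def pvEmit : List String → List String
  | [] => []
  | l :: ls =>
    if pvAlphaFirst l then l :: pvEmit ls
    else PySem.Str.join "" (l :: ls.takeWhile (fun x => !pvAlphaFirst x)) ::
         pvEmit (ls.dropWhile (fun x => !pvAlphaFirst x))
  termination_by ls => ls.length
  decreasing_by
    · simp
    · simpa using Nat.lt_succ_of_le (List.length_dropWhile_le _ _)

def cleanup_text_alt (text : String) : List String :=
  pvEmit ((((PySem.Str.split? text "\n").getD []).map PySem.Str.strip).filter (fun l => l ≠ ""))

-- ===== PRECONDITION & SPEC =====
def Spec_cleanup_text (text : String) (out : List String) : Prop := out = cleanup_text_alt text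
instance (text : String) (out : List String) : Decidable (Spec_cleanup_text text out) := by unfold Spec_cleanup_text; infer_instance

-- ===== CLAIM (what is proved, stated in full; the proofs are below) =====
def Claim_equal_cleanup_text : Prop := ∀ (text : String), Dom_cleanup_text text → Spec_cleanup_text text (cleanup_text text)

-- ===== LEMMAS AND PROOFS =====

-- characterisation of A's remaining output given pending accumulator `curr`, over cleaned lines
def pvRem (curr : String) : List String → List String
  | [] => if curr ≠ "" then [curr] else []
  | l :: ls =>
    if pvAlphaFirst l then (if curr ≠ "" then [curr] else []) ++ l :: pvRem "" ls
    else pvRem (curr ++ l) ls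

theorem pv_empty_append (a : String) : ("" : String) ++ a = a := by
  apply String.toList_injective; simp

theorem pv_string_append_ne_empty (a b : String) (h : a ≠ "") : a ++ b ≠ "" := by
  intro hc
  apply h
  have := congrArg String.toList hc
  simp at this
  cases this.1
  rfl

theorem pv_join_single (a : String) : PySem.Str.join "" [a] = a := by
  apply String.toList_injective
  simp [PySem.Str.toList_join, PySem.Chars.join_singleton]

theorem pv_join_merge (a b : String) (rest : List String) :
    PySem.Str.join "" (a :: b :: rest) = PySem.Str.join "" ((a ++ b) :: rest) := by
  apply String.toList_injective
  cases rest with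
  | nil =>
      simp [PySem.Str.toList_join, PySem.Chars.join_singleton, PySem.Chars.join_cons_cons]
  | cons c cs =>
      simp [PySem.Str.toList_join, PySem.Chars.join_cons_cons]

-- A's fold, finished by the final flush, equals pvRem over the cleaned lines
theorem pv_fold_rem (ls : List String) : ∀ (acc : List String) (curr : String),
    pvFinishA (List.foldl pvStepA (acc, curr) ls)
      = acc ++ pvRem curr ((ls.map PySem.Str.strip).filter (fun l => l ≠ "")) := by
  induction ls with
  | nil =>
      intro acc curr
      simp only [List.foldl_nil, List.map_nil, List.filter_nil, pvFinishA, pvRem]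
      split <;> simp
  | cons r ls ih =>
      intro acc curr
      rw [List.foldl_cons, List.map_cons, List.filter_cons]
      by_cases h0 : PySem.Str.strip r = ""
      · rw [show pvStepA (acc, curr) r = (acc, curr) from by simp [pvStepA, h0]]
        simpa [h0] using ih acc curr
      · by_cases ha : pvAlphaFirst (PySem.Str.strip r)
        · rw [show pvStepA (acc, curr) r
              = (acc ++ (if curr ≠ "" then [curr] else []) ++ [PySem.Str.strip r], "")
            from by simp [pvStepA, h0, ha]]
          rw [ih]
          simp [h0, pvRem, ha]
        · rw [show pvStepA (acc, curr) r = (acc, curr ++ PySem.Str.strip r)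
            from by simp [pvStepA, h0, ha]]
          rw [ih]
          simp [h0, pvRem, ha]

-- pvRem over nonempty lines is exactly B's run-scanning pvEmit
theorem pv_rem_emit (ls : List String) (hne : ∀ l ∈ ls, l ≠ "") :
    pvRem "" ls = pvEmit ls ∧
    ∀ curr, curr ≠ "" →
      pvRem curr ls =
        PySem.Str.join "" (curr :: ls.takeWhile (fun x => !pvAlphaFirst x)) ::
          pvEmit (ls.dropWhile (fun x => !pvAlphaFirst x)) := by
  induction ls with
  | nil =>
      refine ⟨by simp [pvRem, pvEmit], ?_⟩
      intro curr hc
      simp [pvRem, pvEmit, hc, pv_join_single]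
  | cons l ls ih =>
      have hl : l ≠ "" := hne l (by simp)
      have ih' := ih (fun x hx => hne x (by simp [hx]))
      by_cases ha : pvAlphaFirst l
      · refine ⟨?_, ?_⟩
        · simp [pvRem, pvEmit, ha, ih'.1]
        · intro curr hc
          rw [show List.takeWhile (fun x => !pvAlphaFirst x) (l :: ls) = [] from by simp [ha],
              show List.dropWhile (fun x => !pvAlphaFirst x) (l :: ls) = l :: ls from by simp [ha],
              pv_join_single]
          simp [pvRem, pvEmit, ha, hc, ih'.1]
      · refine ⟨?_, ?_⟩
        · rw [show pvRem "" (l :: ls) = pvRem (("" : String) ++ l) ls from by simp [pvRem, ha],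
              pv_empty_append, ih'.2 l hl]
          simp [pvEmit, ha]
        · intro curr hc
          rw [show pvRem curr (l :: ls) = pvRem (curr ++ l) ls from by simp [pvRem, ha],
              ih'.2 (curr ++ l) (pv_string_append_ne_empty curr l hc),
              show List.takeWhile (fun x => !pvAlphaFirst x) (l :: ls)
                   = l :: List.takeWhile (fun x => !pvAlphaFirst x) ls from by simp [ha],
              show List.dropWhile (fun x => !pvAlphaFirst x) (l :: ls)
                   = List.dropWhile (fun x => !pvAlphaFirst x) ls from by simp [ha],
              pv_join_merge]

-- ===== VERDICT (by name: the statement is the Claim_ definition above) =====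
theorem cleanup_text_spec : Claim_equal_cleanup_text := by
  intro text _
  unfold Spec_cleanup_text cleanup_text cleanup_text_alt
  rw [pv_fold_rem]
  rw [(pv_rem_emit _ (by intro l hl; simp [List.mem_filter] at hl; exact hl.2)).1]
  simp
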